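-- pv_equiv track=rewrite | github.com/KBRglobal/Traviapp | attached_assets/app_1766226113190.py | sort_images_freepik_first
-- ===== SOURCE A (Python) =====
-- def sort_images_freepik_first(images):
--     freepik = []
--     gemini = []
--     openai = []
--     other = []
--
--     for img in images:
--         source = img.get("source", "")
--         provider = img.get("source_provider", img.get("provider", ""))
--         path = img.get("path", "").lower()
--
--         if source == "freepik" or "freepik" in path:
--             freepik.append(img)
--         elif provider == "gemini":
--             gemini.append(img)
--         elif provider == "openai":
--             openai.append(img)
--         else:
--             other.append(img)
--
--     return freepik + gemini + openai + other
-- ===== SOURCE B (Python) =====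
-- def sort_images_freepik_first(images):
--     def priority(img):
--         source = img.get("source", "")
--         provider = img.get("source_provider", img.get("provider", ""))
--         path = img.get("path", "").lower()
--         if source == "freepik" or "freepik" in path:
--             return 0
--         if provider == "gemini":
--             return 1
--         if provider == "openai":
--             return 2
--         return 3
--     return sorted(images, key=priority)
-- ===== Notes on version B (the rewrite author's own statement) =====
-- stated objective: idiomatic
-- what changed: Replaces the four-bucket partition pass with a single stable sort by a 0-3 priority key (freepik/gemini/openai/other), relying on sort stability for intra-class order.
import Mathlib
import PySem

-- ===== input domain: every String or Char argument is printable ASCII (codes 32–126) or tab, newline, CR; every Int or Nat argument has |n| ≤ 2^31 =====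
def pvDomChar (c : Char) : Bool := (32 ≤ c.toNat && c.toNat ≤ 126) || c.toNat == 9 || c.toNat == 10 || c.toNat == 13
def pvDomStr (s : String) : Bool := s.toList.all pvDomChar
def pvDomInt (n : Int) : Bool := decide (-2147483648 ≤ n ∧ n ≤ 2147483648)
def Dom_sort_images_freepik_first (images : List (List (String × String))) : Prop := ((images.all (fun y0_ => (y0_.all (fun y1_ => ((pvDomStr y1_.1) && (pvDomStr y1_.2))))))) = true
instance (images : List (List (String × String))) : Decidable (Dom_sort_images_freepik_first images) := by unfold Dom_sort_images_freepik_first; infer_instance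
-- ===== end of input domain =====

-- B replaces A's four-bucket partition pass with a single stable sort by a 0–3 priority key (idiomatic; same result order).

-- ===== PORT A =====
-- dict.get(k, default) on an association list: first matching key (exact for a
-- Python dict, whose keys are unique)
def pvGetD (d : List (String × String)) (k : String) (dflt : String) : String :=
  ((d.find? (fun p => p.1 == k)).map Prod.snd).getD dflt

-- A's loop state: the four buckets (freepik, gemini, openai, other)
def pvStepA (st : List (List (String × String)) × List (List (String × String)) × List (List (String × String)) × List (List (String × String)))
    (img : List (String × String)) :
    List (List (String × String)) × List (List (String × String)) × List (List (String × String)) × List (List (String × String)) :=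
  let source := pvGetD img "source" ""
  let provider := pvGetD img "source_provider" (pvGetD img "provider" "")
  let path := PySem.Str.lower (pvGetD img "path" "")
  if source == "freepik" || PySem.Str.isIn "freepik" path then
    (st.1 ++ [img], st.2.1, st.2.2.1, st.2.2.2)
  else if provider == "gemini" then
    (st.1, st.2.1 ++ [img], st.2.2.1, st.2.2.2)
  else if provider == "openai" then
    (st.1, st.2.1, st.2.2.1 ++ [img], st.2.2.2)
  else
    (st.1, st.2.1, st.2.2.1, st.2.2.2 ++ [img])

def sort_images_freepik_first (images : List (List (String × String))) : List (List (String × String)) :=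
  let r := images.foldl pvStepA ([], [], [], [])
  r.1 ++ r.2.1 ++ r.2.2.1 ++ r.2.2.2

-- ===== PORT B =====
-- B's priority key function (0 = freepik, 1 = gemini, 2 = openai, 3 = other)
def pvPriority (img : List (String × String)) : Nat :=
  let source := pvGetD img "source" ""
  let provider := pvGetD img "source_provider" (pvGetD img "provider" "")
  let path := PySem.Str.lower (pvGetD img "path" "")
  if source == "freepik" || PySem.Str.isIn "freepik" path then 0
  else if provider == "gemini" then 1
  else if provider == "openai" then 2
  else 3

def sort_images_freepik_first_alt (images : List (List (String × String))) : List (List (String × String)) :=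
  PySem.List.sorted images pvPriority

-- ===== PRECONDITION & SPEC =====
def Spec_sort_images_freepik_first (images : List (List (String × String))) (out : List (List (String × String))) : Prop := out = sort_images_freepik_first_alt images
instance (images : List (List (String × String))) (out : List (List (String × String))) : Decidable (Spec_sort_images_freepik_first images out) := by unfold Spec_sort_images_freepik_first; infer_instance

-- ===== CLAIM (what is proved, stated in full; the proofs are below) =====
def Claim_equal_sort_images_freepik_first : Prop := ∀ (images : List (List (String × String))), Dom_sort_images_freepik_first images → Spec_sort_images_freepik_first images (sort_images_freepik_first images)

-- ===== LEMMAS AND PROOFS =====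

-- insertion skips a prefix it does not go before
theorem pv_insertBy_append {α : Type} (before : α → α → Bool) (x : α) (l r : List α)
    (h : ∀ y ∈ l, before x y = false) :
    PySem.List.insertBy before x (l ++ r) = l ++ PySem.List.insertBy before x r := by
  induction l with
  | nil => simp
  | cons a l ih =>
    have ha : before x a = false := h a (by simp)
    simp [PySem.List.insertBy, ha, ih (fun y hy => h y (by simp [hy]))]

-- insertion goes straight to the front of a list it goes before everywhere
theorem pv_insertBy_front {α : Type} (before : α → α → Bool) (x : α) (r : List α)
    (h : ∀ y ∈ r, before x y = true) :
    PySem.List.insertBy before x r = x :: r := by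
  cases r with
  | nil => simp [PySem.List.insertBy]
  | cons a r => simp [PySem.List.insertBy, h a (by simp)]

-- the stable-insertion fold keeps the accumulator in bucket-concatenated form,
-- matching A's partition fold
theorem pv_main (xs : List (List (String × String)))
    (f g o t : List (List (String × String)))
    (hf : ∀ y ∈ f, pvPriority y = 0) (hg : ∀ y ∈ g, pvPriority y = 1)
    (ho : ∀ y ∈ o, pvPriority y = 2) (ht : ∀ y ∈ t, pvPriority y = 3) :
    xs.foldl (fun acc x => PySem.List.insertBy (fun a b => decide (pvPriority a < pvPriority b)) x acc)
        (f ++ g ++ o ++ t)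
      = (let r := xs.foldl pvStepA (f, g, o, t); r.1 ++ r.2.1 ++ r.2.2.1 ++ r.2.2.2) := by
  induction xs generalizing f g o t with
  | nil => simp
  | cons x xs ih =>
    simp only [List.foldl_cons]
    by_cases h0 : (pvGetD x "source" "" == "freepik"
        || PySem.Str.isIn "freepik" (PySem.Str.lower (pvGetD x "path" ""))) = true
    · have hp : pvPriority x = 0 := by simp only [pvPriority]; rw [if_pos h0]
      have hins : PySem.List.insertBy (fun a b => decide (pvPriority a < pvPriority b)) x
          (f ++ g ++ o ++ t) = (f ++ [x]) ++ g ++ o ++ t := by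
        rw [show f ++ g ++ o ++ t = f ++ (g ++ o ++ t) by simp,
          pv_insertBy_append _ _ _ _ (by intro y hy; simp [hf y hy, hp]),
          pv_insertBy_front _ _ _ (by
            intro y hy; simp only [List.mem_append] at hy
            rcases hy with (hy | hy) | hy
            · simp [hg y hy, hp]
            · simp [ho y hy, hp]
            · simp [ht y hy, hp])]
        simp
      rw [hins, show pvStepA (f, g, o, t) x = (f ++ [x], g, o, t) by simp only [pvStepA]; rw [if_pos h0]]
      exact ih (f ++ [x]) g o t
        (by intro y hy; rcases List.mem_append.1 hy with hy | hy
            · exact hf y hy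
            · simp at hy; simpa [hy] using hp) hg ho ht
    · by_cases h1 : (pvGetD x "source_provider" (pvGetD x "provider" "") == "gemini") = true
      · have hp : pvPriority x = 1 := by simp only [pvPriority]; rw [if_neg h0, if_pos h1]
        have hins : PySem.List.insertBy (fun a b => decide (pvPriority a < pvPriority b)) x
            (f ++ g ++ o ++ t) = f ++ (g ++ [x]) ++ o ++ t := by
          rw [show f ++ g ++ o ++ t = (f ++ g) ++ (o ++ t) by simp,
            pv_insertBy_append _ _ _ _ (by
              intro y hy; rcases List.mem_append.1 hy with hy | hy
              · simp [hf y hy, hp]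
              · simp [hg y hy, hp]),
            pv_insertBy_front _ _ _ (by
              intro y hy; rcases List.mem_append.1 hy with hy | hy
              · simp [ho y hy, hp]
              · simp [ht y hy, hp])]
          simp
        rw [hins, show pvStepA (f, g, o, t) x = (f, g ++ [x], o, t) by simp only [pvStepA]; rw [if_neg h0, if_pos h1]]
        exact ih f (g ++ [x]) o t hf
          (by intro y hy; rcases List.mem_append.1 hy with hy | hy
              · exact hg y hy
              · simp at hy; simpa [hy] using hp) ho ht
      · by_cases h2 : (pvGetD x "source_provider" (pvGetD x "provider" "") == "openai") = true
        · have hp : pvPriority x = 2 := by simp only [pvPriority]; rw [if_neg h0, if_neg h1, if_pos h2]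
          have hins : PySem.List.insertBy (fun a b => decide (pvPriority a < pvPriority b)) x
              (f ++ g ++ o ++ t) = f ++ g ++ (o ++ [x]) ++ t := by
            rw [show f ++ g ++ o ++ t = (f ++ g ++ o) ++ t by simp,
              pv_insertBy_append _ _ _ _ (by
                intro y hy; simp only [List.mem_append] at hy
                rcases hy with (hy | hy) | hy
                · simp [hf y hy, hp]
                · simp [hg y hy, hp]
                · simp [ho y hy, hp]),
              pv_insertBy_front _ _ _ (by intro y hy; simp [ht y hy, hp])]
            simp
          rw [hins, show pvStepA (f, g, o, t) x = (f, g, o ++ [x], t) by simp only [pvStepA]; rw [if_neg h0, if_neg h1, if_pos h2]]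
          exact ih f g (o ++ [x]) t hf hg
            (by intro y hy; rcases List.mem_append.1 hy with hy | hy
                · exact ho y hy
                · simp at hy; simpa [hy] using hp) ht
        · have hp : pvPriority x = 3 := by simp only [pvPriority]; rw [if_neg h0, if_neg h1, if_neg h2]
          have hins : PySem.List.insertBy (fun a b => decide (pvPriority a < pvPriority b)) x
              (f ++ g ++ o ++ t) = f ++ g ++ o ++ (t ++ [x]) := by
            rw [PySem.List.insertBy_of_forall_not_before _ _ _ (by
              intro y hy; simp only [List.mem_append] at hy
              rcases hy with ((hy | hy) | hy) | hy
              · simp [hf y hy, hp]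
              · simp [hg y hy, hp]
              · simp [ho y hy, hp]
              · simp [ht y hy, hp])]
            simp
          rw [hins, show pvStepA (f, g, o, t) x = (f, g, o, t ++ [x]) by simp only [pvStepA]; rw [if_neg h0, if_neg h1, if_neg h2]]
          exact ih f g o (t ++ [x]) hf hg ho
            (by intro y hy; rcases List.mem_append.1 hy with hy | hy
                · exact ht y hy
                · simp at hy; simpa [hy] using hp)

-- ===== VERDICT (by name: the statement is the Claim_ definition above) =====
theorem sort_images_freepik_first_spec : Claim_equal_sort_images_freepik_first := by
  intro images _
  show sort_images_freepik_first images = sort_images_freepik_first_alt images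
  rw [sort_images_freepik_first_alt, PySem.List.sorted_eq_foldl_insertBy,
    show ([] : List (List (String × String))) = ([] ++ [] ++ [] ++ []) by simp,
    pv_main images [] [] [] [] (by simp) (by simp) (by simp) (by simp)]
  rfl
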